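-- pv_equiv track=rewrite | github.com/ashneo76/placepop | searcher.py | handle_choices
-- ===== SOURCE A (Python) =====
-- def handle_choices(choices_str, min_val, max_val):
--     choices = choices_str.split(',')
--     choices_list = []
--     for choice in choices:
--         choice_num = choice.strip()
--         if choice_num == '':
--             continue
--         else:
--             try:
--                 choice_num = int(choice_num)
--             except ValueError:
--                 # skip in case of weird input
--                 continue
--
--             if min_val <= choice_num <= max_val:
--                 choices_list.append(choice_num)
--             elif choice_num == -1:
--                 choices_list = [-1]
--                 break
--             elif choice_num == 0:
--                 choices_list = [0]
--                 break
--
--     return choices_list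
-- ===== SOURCE B (Python) =====
-- def handle_choices(choices_str, min_val, max_val):
--     # pass 1: parse every comma-separated token into an int, dropping unparsable ones
--     nums = []
--     for tok in choices_str.split(','):
--         try:
--             nums.append(int(tok.strip()))
--         except ValueError:
--             pass
--     # pass 2: the first out-of-range sentinel (-1 or 0) wins outright ...
--     for n in nums:
--         if not (min_val <= n <= max_val) and n in (-1, 0):
--             return [n]
--     # ... otherwise keep exactly the in-range values
--     return [n for n in nums if min_val <= n <= max_val]
-- ===== Notes on version B (the rewrite author's own statement) =====
-- stated objective: alternative
-- what changed: A is one fused loop that accumulates in-range values and breaks on a sentinel; B is two passes: first parse all tokens into a list of ints, then search that list for the first out-of-range sentinel (-1/0) and return it alone, else filter the in-range values.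
import Mathlib
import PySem

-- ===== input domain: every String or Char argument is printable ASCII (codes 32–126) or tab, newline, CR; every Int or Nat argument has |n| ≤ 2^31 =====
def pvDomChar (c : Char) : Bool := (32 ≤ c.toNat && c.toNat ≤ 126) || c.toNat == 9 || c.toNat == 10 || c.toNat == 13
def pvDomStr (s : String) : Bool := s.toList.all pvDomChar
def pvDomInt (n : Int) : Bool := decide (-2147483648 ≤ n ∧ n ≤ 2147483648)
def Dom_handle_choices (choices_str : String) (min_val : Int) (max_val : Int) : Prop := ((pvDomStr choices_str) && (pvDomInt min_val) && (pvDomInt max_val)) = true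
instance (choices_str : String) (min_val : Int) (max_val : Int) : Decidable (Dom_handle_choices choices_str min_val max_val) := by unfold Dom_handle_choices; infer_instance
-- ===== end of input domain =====

-- B replaces A's fused accumulate-and-break loop by two passes: parse all tokens first,
-- then either return the first out-of-range sentinel alone or filter the in-range values (objective: alternative).

-- ===== PORT A =====
-- A's fused for-loop: accumulator acc, early return on the sentinel branches (break).
def hcA_loop (min_val max_val : Int) : List String → List Int → List Int
  | [], acc => acc
  | choice :: rest, acc =>
    let choice_num := PySem.Str.strip choice
    if choice_num = "" then hcA_loop min_val max_val rest acc
    else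
      match PySem.Int.ofStr? choice_num with
      | none => hcA_loop min_val max_val rest acc
      | some n =>
        if min_val ≤ n ∧ n ≤ max_val then hcA_loop min_val max_val rest (acc ++ [n])
        else if n = -1 then [-1]
        else if n = 0 then [0]
        else hcA_loop min_val max_val rest acc

def handle_choices (choices_str : String) (min_val : Int) (max_val : Int) : List Int :=
  hcA_loop min_val max_val ((PySem.Str.split? choices_str ",").getD []) []

-- ===== PORT B =====
-- B pass 1: parse every token, dropping the ones int() rejects.
def hcB_parse : List String → List Int
  | [] => []
  | tok :: rest =>
    match PySem.Int.ofStr? (PySem.Str.strip tok) with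
    | some n => n :: hcB_parse rest
    | none => hcB_parse rest

-- B pass 2a: first out-of-range sentinel, if any.
def hcB_scan (min_val max_val : Int) : List Int → Option Int
  | [] => none
  | n :: rest =>
    if ¬ (min_val ≤ n ∧ n ≤ max_val) ∧ (n = -1 ∨ n = 0) then some n
    else hcB_scan min_val max_val rest

def handle_choices_alt (choices_str : String) (min_val : Int) (max_val : Int) : List Int :=
  let nums := hcB_parse ((PySem.Str.split? choices_str ",").getD [])
  match hcB_scan min_val max_val nums with
  | some n => [n]
  | none => nums.filter (fun n => decide (min_val ≤ n ∧ n ≤ max_val))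

-- ===== PRECONDITION & SPEC =====
def Spec_handle_choices (choices_str : String) (min_val : Int) (max_val : Int) (out : List Int) : Prop := out = handle_choices_alt choices_str min_val max_val
instance (choices_str : String) (min_val : Int) (max_val : Int) (out : List Int) : Decidable (Spec_handle_choices choices_str min_val max_val out) := by unfold Spec_handle_choices; infer_instance

-- ===== CLAIM (what is proved, stated in full; the proofs are below) =====
def Claim_equal_handle_choices : Prop := ∀ (choices_str : String) (min_val : Int) (max_val : Int), Dom_handle_choices choices_str min_val max_val → Spec_handle_choices choices_str min_val max_val (handle_choices choices_str min_val max_val)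

-- ===== LEMMAS AND PROOFS =====
lemma ofStr?_empty : PySem.Int.ofStr? "" = none := by decide

lemma hcA_loop_eq (min_val max_val : Int) (toks : List String) :
    ∀ acc : List Int,
      hcA_loop min_val max_val toks acc =
        match hcB_scan min_val max_val (hcB_parse toks) with
        | some n => [n]
        | none => acc ++ (hcB_parse toks).filter (fun n => decide (min_val ≤ n ∧ n ≤ max_val)) := by
  induction toks with
  | nil => intro acc; simp [hcA_loop, hcB_parse, hcB_scan]
  | cons c rest ih =>
    intro acc
    by_cases hs : PySem.Str.strip c = ""
    · simp [hcA_loop, hcB_parse, hs, ofStr?_empty, ih]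
    · cases hp : PySem.Int.ofStr? (PySem.Str.strip c) with
      | none => simp [hcA_loop, hcB_parse, hs, hp, ih]
      | some n =>
        by_cases hin : min_val ≤ n ∧ n ≤ max_val
        · have hnt : ¬ (¬ (min_val ≤ n ∧ n ≤ max_val) ∧ (n = -1 ∨ n = 0)) := by
            intro h; exact h.1 hin
          simp only [hcA_loop, hcB_parse, hs, hp, if_pos hin]
          rw [ih (acc ++ [n])]
          simp [hcB_scan, hin]
        · by_cases h1 : n = -1
          · subst h1
            simp [hcA_loop, hcB_parse, hcB_scan, hs, hp, hin]
          · by_cases h0 : n = 0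
            · subst h0
              simp [hcA_loop, hcB_parse, hcB_scan, hs, hp, hin, h1]
            · have hnt : ¬ (¬ (min_val ≤ n ∧ n ≤ max_val) ∧ (n = -1 ∨ n = 0)) := by
                rintro ⟨-, h | h⟩ <;> [exact h1 h; exact h0 h]
              simp [hcA_loop, hcB_parse, hcB_scan, hs, hp, hin, h1, h0, ih]

-- ===== VERDICT (by name: the statement is the Claim_ definition above) =====
theorem handle_choices_spec : Claim_equal_handle_choices := by
  intro choices_str min_val max_val _
  unfold Spec_handle_choices handle_choices handle_choices_alt
  rw [hcA_loop_eq]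
  cases h : hcB_scan min_val max_val (hcB_parse ((PySem.Str.split? choices_str ",").getD [])) <;> simp [h]
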